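-- pv_equiv track=rewrite | github.com/FinemechanicPub/problems | yandex_trainig_7/part_3/solution_i.py | block_ham
-- ===== SOURCE A (Python) =====
-- def block_ham(block: str):
--     """
--     >>> block_ham("0100010000111101")
--     [0, 1, 0, 0, 1, 0, 0, 1, 0, 1, 0, 0, 0, 0, 1, 1, 1, 1, 1, 0, 1]
--     """
--     result: list[int] = []
--     index = 1
--     for bit in block:
--         while index.bit_count() == 1:
--             result.append(1)
--             index += 1
--         value = 1 if bit == "1" else 0
--         result.append(value)
--         mask = 1
--         while mask < index:
--             if index & mask:
--                 result[mask - 1] ^= value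
--             mask <<= 1
--         index += 1
--     return result
-- ===== SOURCE B (Python) =====
-- def block_ham(block: str):
--     vals = [1 if c == "1" else 0 for c in block]
--     if not vals:
--         return []
--     # pass 1: 1-based codeword position of each data bit (skipping powers of two)
--     pos = []
--     p = 0
--     for _ in vals:
--         p += 1
--         while p & (p - 1) == 0:
--             p += 1
--         pos.append(p)
--     n = pos[-1]
--     # pass 2: place the data bits into a zero-initialised codeword
--     result = [0] * n
--     for q, v in zip(pos, vals):
--         result[q - 1] = v
--     # pass 3: each parity slot, computed from scratch over all data bits
--     q = 1
--     while q < n: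
--         par = 1
--         for i, v in zip(pos, vals):
--             if i & q:
--                 par ^= v
--         result[q - 1] = par
--         q <<= 1
--     return result
-- ===== Notes on version B (the rewrite author's own statement) =====
-- stated objective: alternative
-- what changed: A builds the codeword in one interleaved pass, back-patching parity slots in place with XOR as each data bit arrives; B first lays out the data-bit positions, places the bits into a zero-initialised codeword, and then computes each parity slot from scratch in a separate pass over all data bits.
import Mathlib
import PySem

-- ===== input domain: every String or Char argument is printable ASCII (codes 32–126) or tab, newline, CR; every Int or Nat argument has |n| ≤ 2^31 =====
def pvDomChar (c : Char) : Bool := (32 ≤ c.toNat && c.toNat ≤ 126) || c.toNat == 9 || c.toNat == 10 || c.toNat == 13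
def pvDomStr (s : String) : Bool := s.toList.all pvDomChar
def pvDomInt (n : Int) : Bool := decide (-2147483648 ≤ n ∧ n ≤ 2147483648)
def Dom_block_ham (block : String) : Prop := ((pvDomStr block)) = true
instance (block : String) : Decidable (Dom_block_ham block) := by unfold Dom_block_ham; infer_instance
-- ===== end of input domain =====

-- B rebuilds the codeword in separate passes (data layout, placement, parity slots computed from
-- scratch) instead of A's single interleaved pass with in-place XOR back-patching; same values.

-- Lemmas the ports' termination proofs cite (power-of-two facts); they must precede the ports.
theorem pvLandZero (m n : Nat) :
    m &&& n = 0 ↔ ∀ i, ¬(m.testBit i = true ∧ n.testBit i = true) := by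
  constructor
  · intro h i hi
    have := Nat.testBit_land m n i
    rw [h, Nat.zero_testBit, hi.1, hi.2] at this
    simp at this
  · intro h
    apply Nat.eq_of_testBit_eq
    intro i
    rw [Nat.testBit_land, Nat.zero_testBit]
    specialize h i
    rcases hm : m.testBit i <;> rcases hn : n.testBit i <;> simp_all

theorem pvBc_zero (m : Nat) : PySem.Int.bitCount (m : Int) = 0 ↔ m = 0 := by
  induction m using Nat.strong_induction_on with
  | _ m ih =>
    rcases Nat.eq_zero_or_pos m with h0 | hpos
    · subst h0; simp
    · rw [PySem.Int.bitCount_natCast hpos]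
      rcases Nat.even_or_odd m with he | ho
      · have h2 : m % 2 = 0 := Nat.even_iff.mp he
        rw [h2, Nat.zero_add, ih (m / 2) (by omega)]
        omega
      · have h2 : m % 2 = 1 := Nat.odd_iff.mp ho
        omega

theorem pvBc_one (m : Nat) : PySem.Int.bitCount (m : Int) = 1 ↔ ∃ k, m = 2 ^ k := by
  induction m using Nat.strong_induction_on with
  | _ m ih =>
    rcases Nat.eq_zero_or_pos m with h0 | hpos
    · subst h0
      simp only [Nat.cast_zero, PySem.Int.bitCount_zero]
      constructor
      · omega
      · rintro ⟨k, hk⟩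
        have := Nat.one_le_two_pow (n := k)
        omega
    · rw [PySem.Int.bitCount_natCast hpos]
      rcases Nat.even_or_odd m with he | ho
      · have h2 : m % 2 = 0 := Nat.even_iff.mp he
        rw [h2]
        simp only [Nat.zero_add]
        rw [ih (m / 2) (by omega)]
        constructor
        · rintro ⟨k, hk⟩
          exact ⟨k + 1, by rw [pow_succ]; omega⟩
        · rintro ⟨k, hk⟩
          rcases k with _ | k'
          · subst hk; omega
          · exact ⟨k', by subst hk; rw [pow_succ] at *; omega⟩
      · have h2 : m % 2 = 1 := Nat.odd_iff.mp ho
        rw [h2]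
        have hz := pvBc_zero (m / 2)
        constructor
        · intro hh
          have : m / 2 = 0 := hz.mp (by omega)
          exact ⟨0, by omega⟩
        · rintro ⟨k, hk⟩
          rcases k with _ | k'
          · have h1 : m = 1 := by omega
            subst h1
            decide
          · exfalso
            subst hk
            rw [pow_succ] at h2
            omega

theorem pvTestBit_top (x k : Nat) (h1 : 2 ^ k ≤ x) (h2 : x < 2 ^ (k + 1)) :
    x.testBit k = true := by
  have hx : x = 2 ^ k + (x - 2 ^ k) := by omega
  rw [hx, Nat.testBit_two_pow_add_eq]
  have : (x - 2 ^ k) < 2 ^ k := by rw [pow_succ] at h2; omega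
  rw [Nat.testBit_lt_two_pow this]
  rfl

theorem pvAndPred (m : Nat) : m &&& (m - 1) = 0 ↔ (m = 0 ∨ ∃ k, m = 2 ^ k) := by
  constructor
  · intro h
    rcases Nat.eq_zero_or_pos m with h0 | hpos
    · exact Or.inl h0
    · right
      refine ⟨m.log2, ?_⟩
      have hle : 2 ^ m.log2 ≤ m := Nat.log2_self_le (by omega)
      have hlt : m < 2 ^ (m.log2 + 1) := Nat.lt_log2_self
      by_contra hne
      have hgt : 2 ^ m.log2 < m := by omega
      have hb1 : m.testBit m.log2 = true := pvTestBit_top m m.log2 hle hlt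
      have hb2 : (m - 1).testBit m.log2 = true := pvTestBit_top (m - 1) m.log2 (by omega) (by omega)
      exact (pvLandZero m (m - 1)).mp h m.log2 ⟨hb1, hb2⟩
  · rintro (h0 | ⟨k, hk⟩)
    · simp [h0]
    · subst hk
      rw [pvLandZero]
      rintro i ⟨ha, hb⟩
      rw [Nat.testBit_two_pow_sub_one] at hb
      have hik : i < k := by simpa using hb
      rw [Nat.testBit_two_pow_of_ne (by omega)] at ha
      simp at ha

theorem pvPow2_succ_not (m : Nat) (h2 : 2 ≤ m) (h : ∃ k, m = 2 ^ k) : ¬ ∃ k, m + 1 = 2 ^ k := by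
  rintro ⟨b, hb⟩
  obtain ⟨a, ha⟩ := h
  rcases a with _ | a'
  · omega
  · rcases b with _ | b'
    · omega
    · rw [pow_succ] at ha hb
      omega

-- ===== PORT A =====
-- Python ints here (index, mask) are always nonnegative, so they are carried as Nat;
-- the mask of the inner while loop is carried as its exponent j (mask = 2^j, 'mask <<= 1' is 'j + 1').

-- 'while index.bit_count() == 1: result.append(1); index += 1'
def pvSkip (index : Nat) (result : List Int) : Nat × List Int :=
  if PySem.Int.bitCount (index : Int) = 1 then pvSkip (index + 1) (result ++ [1])
  else (index, result)
termination_by (if PySem.Int.bitCount (index : Int) = 1 then (if index ≤ 1 then 2 else 1) else 0 : Nat)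
decreasing_by
  rename_i h
  by_cases h1 : index ≤ 1
  · interval_cases index
    · simp at h
    · norm_num [show PySem.Int.bitCount (2 : Int) = 1 from by decide,
        show PySem.Int.bitCount (1 : Int) = 1 from by decide]
  · have h2 : PySem.Int.bitCount ((index + 1 : Nat) : Int) ≠ 1 := by
      intro hc
      exact pvPow2_succ_not index (by omega) ((pvBc_one index).mp h) ((pvBc_one (index + 1)).mp hc)
    push_cast at h2
    simp [h, h2, h1]

-- 'while mask < index: if index & mask: result[mask-1] ^= value; mask <<= 1'
def pvXorMasks (result : List Int) (j : Nat) (index : Nat) (value : Int) : List Int :=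
  if 2 ^ j < index then
    pvXorMasks
      (if index &&& 2 ^ j ≠ 0 then
        PySem.List.pySetD result ((2 ^ j - 1 : Nat) : Int)
          (PySem.Int.bxor (PySem.List.pyGetD result ((2 ^ j - 1 : Nat) : Int) 0) value)
      else result)
      (j + 1) index value
  else result
termination_by index - 2 ^ j
decreasing_by
  have : 1 ≤ 2 ^ j := Nat.one_le_two_pow
  have : 2 ^ (j + 1) = 2 * 2 ^ j := by ring
  omega

-- one iteration of 'for bit in block', with value = 1 if bit == "1" else 0 already computed
def pvAStepV (st : List Int × Nat) (value : Int) : List Int × Nat :=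
  let sk := pvSkip st.2 st.1
  let result := sk.2 ++ [value]
  (pvXorMasks result 0 sk.1 value, sk.1 + 1)

def block_ham (block : String) : List Int :=
  (block.toList.foldl (fun st bit => pvAStepV st (if bit = '1' then 1 else 0)) ([], 1)).1

-- ===== PORT B =====
-- Python ints here (p, n, the positions, and q carried as its exponent j) are nonnegative: carried as Nat.

-- 'p += 1; while p & (p - 1) == 0: p += 1'  (the value of p after the while loop)
def pvNextPos (p : Nat) : Nat :=
  if p &&& (p - 1) = 0 then pvNextPos (p + 1) else p
termination_by (if p &&& (p - 1) = 0 then (if p ≤ 1 then 3 - p else 1) else 0 : Nat)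
decreasing_by
  rename_i h
  by_cases h1 : p ≤ 1
  · interval_cases p <;> simp
  · have h2 : (p + 1) &&& p ≠ 0 := by
      intro hc
      rcases (pvAndPred (p + 1)).mp (by simpa using hc) with h0 | hp
      · omega
      · exact pvPow2_succ_not p (by omega)
          (((pvAndPred p).mp h).resolve_left (by omega)) hp
    simp [h, h1]
    simp [h2]

-- pass 1: 'for _ in vals: p += 1; while p & (p - 1) == 0: p += 1; pos.append(p)'
def pvPositions (vals : List Int) (p : Nat) : List Nat :=
  match vals with
  | [] => []
  | _ :: rest =>
    let q := pvNextPos (p + 1)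
    q :: pvPositions rest q

-- pass 3: 'q = 1; while q < n: par = 1; for i, v in zip(pos, vals): if i & q: par ^= v;
--          result[q-1] = par; q <<= 1'   (q carried as its exponent j, q = 2^j)
def pvParLoop (result : List Int) (pv : List (Nat × Int)) (j : Nat) (n : Nat) : List Int :=
  if 2 ^ j < n then
    let par := pv.foldl (fun a iv => if iv.1 &&& 2 ^ j ≠ 0 then PySem.Int.bxor a iv.2 else a) 1
    pvParLoop (PySem.List.pySetD result ((2 ^ j - 1 : Nat) : Int) par) pv (j + 1) n
  else result
termination_by n - 2 ^ j
decreasing_by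
  have : 1 ≤ 2 ^ j := Nat.one_le_two_pow
  have : 2 ^ (j + 1) = 2 * 2 ^ j := by ring
  omega

def block_ham_alt (block : String) : List Int :=
  let vals : List Int := block.toList.map (fun c => if c = '1' then 1 else 0)
  if vals = [] then []
  else
    let pos := pvPositions vals 0
    let n := PySem.List.pyGetD pos (-1) 0          -- n = pos[-1]
    -- pass 2: 'result = [0] * n; for q, v in zip(pos, vals): result[q - 1] = v'
    let placed := (pos.zip vals).foldl
      (fun res qv => PySem.List.pySetD res ((qv.1 - 1 : Nat) : Int) qv.2)
      (List.replicate n (0 : Int))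
    pvParLoop placed (pos.zip vals) 0 n

-- ===== PRECONDITION & SPEC =====
def Spec_block_ham (block : String) (out : List Int) : Prop := out = block_ham_alt block
instance (block : String) (out : List Int) : Decidable (Spec_block_ham block out) := by unfold Spec_block_ham; infer_instance

-- ===== CLAIM (what is proved, stated in full; the proofs are below) =====
def Claim_equal_block_ham : Prop := ∀ (block : String), Dom_block_ham block → Spec_block_ham block (block_ham block)

-- ===== LEMMAS AND PROOFS =====

-- the parity value B computes for parity slot 2^j (and that A's incremental XORs accumulate there)
def pvPar (pv : List (Nat × Int)) (j : Nat) : Int :=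
  pv.foldl (fun a iv => if iv.1 &&& 2 ^ j ≠ 0 then PySem.Int.bxor a iv.2 else a) 1

theorem pvNextPos_spec (p : Nat) :
    1 ≤ p → (p ≤ pvNextPos p ∧ (¬ ∃ k, pvNextPos p = 2 ^ k) ∧
      (∀ x, p ≤ x → x < pvNextPos p → ∃ k, x = 2 ^ k)) := by
  induction p using pvNextPos.induct with
  | case1 p h ih =>
    intro hp
    obtain ⟨ih1, ih2, ih3⟩ := ih (by omega)
    rw [pvNextPos, if_pos h]
    refine ⟨by omega, ih2, ?_⟩
    intro x hx1 hx2
    rcases Nat.eq_or_lt_of_le hx1 with he | hlt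
    · rw [← he]
      exact ((pvAndPred p).mp h).resolve_left (by omega)
    · exact ih3 x (by omega) hx2
  | case2 p h =>
    intro hp
    rw [pvNextPos, if_neg h]
    refine ⟨le_refl _, fun hc => h ((pvAndPred p).mpr (Or.inr hc)), ?_⟩
    intro x h1 h2
    exact absurd h2 (by omega)

theorem pvSkip_eq (i : Nat) (res : List Int) :
    1 ≤ i → pvSkip i res = (pvNextPos i, res ++ List.replicate (pvNextPos i - i) 1) := by
  induction i, res using pvSkip.induct with
  | case1 i res h ih =>
    intro hi
    have hpow : ∃ k, i = 2 ^ k := (pvBc_one i).mp h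
    have hand : i &&& (i - 1) = 0 := (pvAndPred i).mpr (Or.inr hpow)
    have hnp : pvNextPos i = pvNextPos (i + 1) := by rw [pvNextPos, if_pos hand]
    obtain ⟨h1, -, -⟩ := pvNextPos_spec (i + 1) (by omega)
    rw [pvSkip, if_pos h, ih (by omega), hnp]
    have hc : pvNextPos (i + 1) - i = (pvNextPos (i + 1) - (i + 1)) + 1 := by omega
    rw [hc, List.append_assoc]
    simp [List.replicate_succ]
  | case2 i res h =>
    intro hi
    have hnand : i &&& (i - 1) ≠ 0 := by
      intro hc
      rcases (pvAndPred i).mp hc with h0 | hpow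
      · omega
      · exact h ((pvBc_one i).mpr hpow)
    have hnp : pvNextPos i = i := by rw [pvNextPos, if_neg hnand]
    rw [pvSkip, if_neg h, hnp]
    simp

theorem pvPositions_append (xs ys : List Int) (p : Nat) :
    pvPositions (xs ++ ys) p
      = pvPositions xs p ++ pvPositions ys ((pvPositions xs p).getLastD p) := by
  induction xs generalizing p with
  | nil => simp [pvPositions]
  | cons x xs ih =>
    simp only [List.cons_append, pvPositions, List.getLastD_cons]
    rw [ih]

theorem pvPositions_spec (vals : List Int) (p : Nat) :
    (pvPositions vals p).length = vals.length ∧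
    List.Pairwise (· < ·) (pvPositions vals p) ∧
    (∀ q ∈ pvPositions vals p,
        (¬ ∃ k, q = 2 ^ k) ∧ p < q ∧ q ≤ (pvPositions vals p).getLastD p) ∧
    (∀ x, p < x → x ≤ (pvPositions vals p).getLastD p →
        (∃ k, x = 2 ^ k) ∨ x ∈ pvPositions vals p) ∧
    p ≤ (pvPositions vals p).getLastD p := by
  induction vals generalizing p with
  | nil =>
    refine ⟨rfl, List.Pairwise.nil, by simp [pvPositions], ?_, le_refl _⟩
    intro x h1 h2
    simp [pvPositions] at h2
    omega
  | cons v rest ih =>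
    obtain ⟨np1, np2, np3⟩ := pvNextPos_spec (p + 1) (by omega)
    obtain ⟨ih1, ih2, ih3, ih4, ih5⟩ := ih (pvNextPos (p + 1))
    simp only [pvPositions, List.getLastD_cons]
    refine ⟨by simp [ih1], ?_, ?_, ?_, by omega⟩
    · exact List.pairwise_cons.mpr ⟨fun x hx => (ih3 x hx).2.1, ih2⟩
    · intro q hq
      rcases List.mem_cons.mp hq with he | hm
      · subst he
        exact ⟨np2, by omega, ih5⟩
      · obtain ⟨m1, m2, m3⟩ := ih3 q hm
        exact ⟨m1, by omega, m3⟩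
    · intro x hx1 hx2
      by_cases hlt : x < pvNextPos (p + 1)
      · exact Or.inl (np3 x (by omega) hlt)
      · rcases Nat.eq_or_lt_of_le (Nat.le_of_not_lt hlt) with he | hgt
        · exact Or.inr (List.mem_cons.mpr (Or.inl he.symm))
        · rcases ih4 x hgt hx2 with hp | hm
          · exact Or.inl hp
          · exact Or.inr (List.mem_cons.mpr (Or.inr hm))

theorem pvPowInj (a b : Nat) (h : 2 ^ a - 1 = 2 ^ b - 1) : a = b := by
  have ha : 1 ≤ 2 ^ a := Nat.one_le_two_pow
  have hb : 1 ≤ 2 ^ b := Nat.one_le_two_pow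
  have h2 : (2:Nat) ^ a = 2 ^ b := by omega
  exact Nat.pow_right_injective (by norm_num) h2

theorem pvAndSmall (q j : Nat) (h : q < 2 ^ j) : q &&& 2 ^ j = 0 := by
  rw [Nat.and_two_pow, Nat.testBit_lt_two_pow h]
  simp

theorem pvGetLastD_mem {α : Type} (l : List α) (d : α) (h : l ≠ []) : l.getLastD d ∈ l := by
  induction l generalizing d with
  | nil => exact absurd rfl h
  | cons a l ih =>
    rw [List.getLastD_cons]
    rcases l with _ | ⟨b, l'⟩
    · simp
    · exact List.mem_cons.mpr (Or.inr (ih a (by simp)))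

theorem pvXorMasks_length (res : List Int) (j i : Nat) (v : Int) :
    (pvXorMasks res j i v).length = res.length := by
  fun_induction pvXorMasks res j i v with
  | case1 res j h ih =>
    by_cases hc : i &&& 2 ^ j ≠ 0
    · rw [dif_pos hc] at ih
      rw [if_pos hc, ih]
      simp
    · rw [dif_neg hc] at ih
      rw [if_neg hc, ih]
  | case2 res j h => rfl

theorem pvXorMasks_get_untouched (res : List Int) (j i : Nat) (v : Int) :
    ∀ t, (∀ jj, j ≤ jj → 2 ^ jj < i → i &&& 2 ^ jj ≠ 0 → t ≠ 2 ^ jj - 1) →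
      (pvXorMasks res j i v)[t]? = res[t]? := by
  fun_induction pvXorMasks res j i v with
  | case1 res j h ih =>
    intro t ht
    by_cases hc : i &&& 2 ^ j ≠ 0
    · rw [dif_pos hc] at ih
      rw [if_pos hc, ih t (fun jj hj1 hj2 hj3 => ht jj (by omega) hj2 hj3)]
      simp only [PySem.List.pySetD_natCast]
      rw [List.getElem?_set, if_neg]
      intro he
      exact ht j (le_refl _) h hc he.symm
    · rw [dif_neg hc] at ih
      rw [if_neg hc, ih t (fun jj hj1 hj2 hj3 => ht jj (by omega) hj2 hj3)]
  | case2 res j h =>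
    intro t ht
    rfl

theorem pvXorMasks_get_hit (res : List Int) (j i : Nat) (v : Int) :
    ∀ jj, j ≤ jj → 2 ^ jj < i → i &&& 2 ^ jj ≠ 0 → i ≤ res.length + 1 →
      (pvXorMasks res j i v)[2 ^ jj - 1]?
        = (res[2 ^ jj - 1]?).map (fun x => PySem.Int.bxor x v) := by
  fun_induction pvXorMasks res j i v with
  | case1 res j h ih =>
    intro jj hj1 hj2 hj3 hlen
    have h1 : 1 ≤ 2 ^ j := Nat.one_le_two_pow
    have hjlt : 2 ^ j - 1 < res.length := by omega
    rcases Nat.eq_or_lt_of_le hj1 with he | hlt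
    · subst he
      rw [if_pos hj3]
      rw [pvXorMasks_get_untouched]
      · simp only [PySem.List.pySetD_natCast, PySem.List.pyGetD_natCast]
        rw [List.getElem?_set, if_pos rfl, if_pos hjlt,
          List.getElem?_eq_getElem hjlt, List.getD_eq_getElem res 0 hjlt]
        rfl
      · intro j2 hja hjb hjc he
        have := pvPowInj _ _ he
        omega
    · by_cases hc : i &&& 2 ^ j ≠ 0
      · rw [dif_pos hc] at ih
        rw [if_pos hc]
        rw [ih jj (by omega) hj2 hj3 (by simp only [PySem.List.pySetD_natCast, List.length_set]; omega)]
        simp only [PySem.List.pySetD_natCast]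
        rw [List.getElem?_set, if_neg]
        intro he
        have := pvPowInj _ _ he
        omega
      · rw [dif_neg hc] at ih
        rw [if_neg hc]
        exact ih jj (by omega) hj2 hj3 hlen
  | case2 res j h =>
    intro jj hj1 hj2 hj3 hlen
    have : 2 ^ j ≤ 2 ^ jj := Nat.pow_le_pow_right (by norm_num) hj1
    omega

theorem pvPar_append (pv : List (Nat × Int)) (q : Nat) (v : Int) (j : Nat) :
    pvPar (pv ++ [(q, v)]) j
      = if q &&& 2 ^ j ≠ 0 then PySem.Int.bxor (pvPar pv j) v else pvPar pv j := by
  rw [pvPar, List.foldl_append]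
  by_cases hc : q &&& 2 ^ j ≠ 0 <;> simp [hc, pvPar]

theorem pvPar_one (pv : List (Nat × Int)) (j : Nat) (h : ∀ x ∈ pv, x.1 &&& 2 ^ j = 0) :
    pvPar pv j = 1 := by
  induction pv with
  | nil => rfl
  | cons x rest ih =>
    rw [pvPar, List.foldl_cons, if_neg (by simpa using h x List.mem_cons_self)]
    exact ih (fun y hy => h y (List.mem_cons_of_mem x hy))

theorem pvParLoop_eq (res : List Int) (pv : List (Nat × Int)) (j n : Nat) (h : 2 ^ j < n) :
    pvParLoop res pv j n
      = pvParLoop (PySem.List.pySetD res ((2 ^ j - 1 : Nat) : Int) (pvPar pv j)) pv (j + 1) n := by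
  rw [pvParLoop, if_pos h]
  rfl

theorem pvParLoop_stop (res : List Int) (pv : List (Nat × Int)) (j n : Nat) (h : ¬ 2 ^ j < n) :
    pvParLoop res pv j n = res := by
  rw [pvParLoop, if_neg h]

theorem pvParLoopLenAux (pv : List (Nat × Int)) (n : Nat) :
    ∀ (m : Nat) (res : List Int) (j : Nat), n - 2 ^ j = m →
      (pvParLoop res pv j n).length = res.length := by
  intro m
  induction m using Nat.strong_induction_on with
  | _ m ih =>
    intro res j hm
    by_cases h : 2 ^ j < n
    · have h1 : 1 ≤ 2 ^ j := Nat.one_le_two_pow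
      have h2 : 2 ^ (j + 1) = 2 * 2 ^ j := by ring
      rw [pvParLoop_eq _ _ _ _ h,
        ih (n - 2 ^ (j + 1)) (by omega) _ (j + 1) rfl]
      simp
    · rw [pvParLoop_stop _ _ _ _ h]

theorem pvParLoop_length (res : List Int) (pv : List (Nat × Int)) (j n : Nat) :
    (pvParLoop res pv j n).length = res.length :=
  pvParLoopLenAux pv n _ res j rfl

theorem pvParLoopUntouchedAux (pv : List (Nat × Int)) (n t : Nat) :
    ∀ (m : Nat) (res : List Int) (j : Nat), n - 2 ^ j = m →
      (∀ jj, j ≤ jj → 2 ^ jj < n → t ≠ 2 ^ jj - 1) →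
      (pvParLoop res pv j n)[t]? = res[t]? := by
  intro m
  induction m using Nat.strong_induction_on with
  | _ m ih =>
    intro res j hm ht
    by_cases h : 2 ^ j < n
    · have h1 : 1 ≤ 2 ^ j := Nat.one_le_two_pow
      have h2 : 2 ^ (j + 1) = 2 * 2 ^ j := by ring
      rw [pvParLoop_eq _ _ _ _ h,
        ih (n - 2 ^ (j + 1)) (by omega) _ (j + 1) rfl
          (fun jj hj1 hj2 => ht jj (by omega) hj2)]
      simp only [PySem.List.pySetD_natCast]
      rw [List.getElem?_set, if_neg]
      intro he
      exact ht j (le_refl _) h he.symm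
    · rw [pvParLoop_stop _ _ _ _ h]

theorem pvParLoop_get_untouched (res : List Int) (pv : List (Nat × Int)) (j n : Nat)
    (t : Nat) (ht : ∀ jj, j ≤ jj → 2 ^ jj < n → t ≠ 2 ^ jj - 1) :
    (pvParLoop res pv j n)[t]? = res[t]? :=
  pvParLoopUntouchedAux pv n t _ res j rfl ht

theorem pvParLoopPowAux (pv : List (Nat × Int)) (n : Nat) :
    ∀ (m : Nat) (res : List Int) (j : Nat), n - 2 ^ j = m →
      ∀ jj, j ≤ jj → 2 ^ jj < n → n ≤ res.length →
      (pvParLoop res pv j n)[2 ^ jj - 1]? = some (pvPar pv jj) := by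
  intro m
  induction m using Nat.strong_induction_on with
  | _ m ih =>
    intro res j hm jj hj1 hj2 hlen
    by_cases h : 2 ^ j < n
    · have h1 : 1 ≤ 2 ^ j := Nat.one_le_two_pow
      have h2 : 2 ^ (j + 1) = 2 * 2 ^ j := by ring
      rw [pvParLoop_eq _ _ _ _ h]
      rcases Nat.eq_or_lt_of_le hj1 with he | hlt
      · subst he
        rw [pvParLoop_get_untouched]
        · simp only [PySem.List.pySetD_natCast]
          rw [List.getElem?_set, if_pos rfl, if_pos (by omega)]
        · intro j2 hja hjb he
          have := pvPowInj _ _ he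
          omega
      · rw [ih (n - 2 ^ (j + 1)) (by omega) _ (j + 1) rfl jj (by omega) hj2
          (by simp only [PySem.List.pySetD_natCast, List.length_set]; omega)]
    · have : 2 ^ j ≤ 2 ^ jj := Nat.pow_le_pow_right (by norm_num) hj1
      omega

theorem pvParLoop_get_pow (res : List Int) (pv : List (Nat × Int)) (j n : Nat)
    (jj : Nat) (hj1 : j ≤ jj) (hj2 : 2 ^ jj < n) (hlen : n ≤ res.length) :
    (pvParLoop res pv j n)[2 ^ jj - 1]? = some (pvPar pv jj) :=
  pvParLoopPowAux pv n _ res j rfl jj hj1 hj2 hlen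

theorem pvPlaced_length (pv : List (Nat × Int)) :
    ∀ base : List Int,
    (pv.foldl (fun res qv => PySem.List.pySetD res ((qv.1 - 1 : Nat) : Int) qv.2) base).length
      = base.length := by
  induction pv with
  | nil => intro base; rfl
  | cons x rest ih =>
    intro base
    rw [List.foldl_cons, ih]
    simp [PySem.List.pySetD_natCast]

theorem pvPlaced_get_untouched (pv : List (Nat × Int)) (t : Nat) :
    ∀ base : List Int, (∀ x ∈ pv, x.1 ≠ t + 1) → (∀ x ∈ pv, 1 ≤ x.1) →
    (pv.foldl (fun res qv => PySem.List.pySetD res ((qv.1 - 1 : Nat) : Int) qv.2) base)[t]?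
      = base[t]? := by
  induction pv with
  | nil => intro base _ _; rfl
  | cons x rest ih =>
    intro base h h1
    rw [List.foldl_cons,
      ih _ (fun y hy => h y (List.mem_cons_of_mem x hy)) (fun y hy => h1 y (List.mem_cons_of_mem x hy))]
    simp only [PySem.List.pySetD_natCast]
    rw [List.getElem?_set, if_neg]
    have hx := h x List.mem_cons_self
    have hx1 := h1 x List.mem_cons_self
    omega

theorem pvPlaced_get_hit (pv : List (Nat × Int)) (t : Nat) :
    ∀ base : List Int, List.Pairwise (fun a b => a.1 < b.1) pv → (∀ x ∈ pv, 1 ≤ x.1) →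
    t < base.length →
    ∀ k, (hk : k < pv.length) → pv[k].1 = t + 1 →
      (pv.foldl (fun res qv => PySem.List.pySetD res ((qv.1 - 1 : Nat) : Int) qv.2) base)[t]?
        = some pv[k].2 := by
  induction pv with
  | nil =>
    intro base _ _ _ k hk
    simp at hk
  | cons x rest ih =>
    intro base hp h1 ht k hk hhit
    rcases List.pairwise_cons.mp hp with ⟨hx, hrest⟩
    rcases k with _ | k'
    · simp only [List.getElem_cons_zero] at hhit ⊢
      rw [List.foldl_cons]
      rw [pvPlaced_get_untouched rest t _
        (fun y hy => by have := hx y hy; omega)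
        (fun y hy => h1 y (List.mem_cons_of_mem x hy))]
      simp only [PySem.List.pySetD_natCast]
      rw [hhit]
      simp only [Nat.add_sub_cancel]
      rw [List.getElem?_set, if_pos rfl, if_pos ht]
    · simp only [List.getElem_cons_succ] at hhit ⊢
      rw [List.foldl_cons]
      exact ih _ hrest (fun y hy => h1 y (List.mem_cons_of_mem x hy))
        (by simpa [PySem.List.pySetD_natCast] using ht) k' (by simpa using hk) hhit

theorem pvGetLast_getLastD {α : Type} (l : List α) (h : l ≠ []) (d : α) :
    l.getLast h = l.getLastD d := by
  cases l with
  | nil => exact absurd rfl h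
  | cons a t => rw [List.getLast_eq_getLastD, List.getLastD_cons]

theorem pvPairwise_zip (P : List Nat) (vals : List Int)
    (hp : List.Pairwise (· < ·) P) :
    List.Pairwise (fun a b : Nat × Int => a.1 < b.1) (P.zip vals) := by
  rw [List.pairwise_iff_getElem] at hp ⊢
  intro i j hi hj hij
  have hlen := List.length_zip (l₁ := P) (l₂ := vals)
  simp only [List.getElem_zip]
  exact hp i j (by omega) (by omega) hij

theorem pvA_char (vals : List Int) :
    (vals.foldl pvAStepV ([], 1)).2 = (pvPositions vals 0).getLastD 0 + 1 ∧
    (vals.foldl pvAStepV ([], 1)).1.length = (pvPositions vals 0).getLastD 0 ∧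
    (∀ j, 2 ^ j ≤ (pvPositions vals 0).getLastD 0 →
      (vals.foldl pvAStepV ([], 1)).1[2 ^ j - 1]? =
        some (pvPar ((pvPositions vals 0).zip vals) j)) ∧
    (∀ k, k < (pvPositions vals 0).length →
      (vals.foldl pvAStepV ([], 1)).1[(pvPositions vals 0).getD k 0 - 1]? =
        some (vals.getD k 0)) := by
  induction vals using List.reverseRecOn with
  | nil =>
    refine ⟨rfl, rfl, ?_, ?_⟩
    · intro j hj
      have h1 : 1 ≤ 2 ^ j := Nat.one_le_two_pow
      rw [show (pvPositions ([] : List Int) 0).getLastD 0 = 0 from rfl] at hj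
      omega
    · intro k hk
      simp [pvPositions] at hk
  | append_singleton done v ih =>
    obtain ⟨ih1, ih2, ih3, ih4⟩ := ih
    obtain ⟨ps1, ps2, ps3, ps4, ps5⟩ := pvPositions_spec done 0
    set Pd := pvPositions done 0 with hPd
    set nd := Pd.getLastD 0 with hnd
    set pnew := pvNextPos (nd + 1) with hpnew
    obtain ⟨np1, np2, np3⟩ := pvNextPos_spec (nd + 1) (by omega)
    rw [← hpnew] at np1 np2 np3
    have h2j1 : ∀ j : Nat, 1 ≤ 2 ^ j := fun j => Nat.one_le_two_pow
    have hposapp : pvPositions (done ++ [v]) 0 = Pd ++ [pnew] := by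
      rw [pvPositions_append, ← hPd, ← hnd]
      rfl
    set St := done.foldl pvAStepV ([], 1) with hSt
    have hsk : pvSkip St.2 St.1 = (pnew, St.1 ++ List.replicate (pnew - (nd + 1)) 1) := by
      rw [ih1]
      exact pvSkip_eq _ _ (by omega)
    have hstep : (done ++ [v]).foldl pvAStepV ([], 1)
        = (pvXorMasks ((St.1 ++ List.replicate (pnew - (nd + 1)) 1) ++ [v]) 0 pnew v,
           pnew + 1) := by
      rw [List.foldl_append]
      show pvAStepV St v = _
      rw [pvAStepV, hsk]
    set res2 := (St.1 ++ List.replicate (pnew - (nd + 1)) 1) ++ [v] with hres2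
    have hlen2 : res2.length = pnew := by
      rw [hres2]
      simp only [List.length_append, List.length_replicate, List.length_cons, List.length_nil]
      omega
    have hzip : (Pd ++ [pnew]).zip (done ++ [v]) = Pd.zip done ++ [(pnew, v)] :=
      List.zip_append ps1
    have hlast : (pvPositions (done ++ [v]) 0).getLastD 0 = pnew := by
      rw [hposapp, List.getLastD_concat]
    refine ⟨?_, ?_, ?_, ?_⟩
    · rw [hstep, hlast]
    · rw [hstep, hlast]
      show (pvXorMasks res2 0 pnew v).length = pnew
      rw [pvXorMasks_length, hlen2]
    · intro j hj
      rw [hlast] at hj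
      have hjlt : 2 ^ j < pnew := by
        rcases Nat.eq_or_lt_of_le hj with he | hlt
        · exact absurd ⟨j, he.symm⟩ np2
        · exact hlt
      rw [hstep, hposapp, hzip, pvPar_append]
      show (pvXorMasks res2 0 pnew v)[2 ^ j - 1]? = _
      have hSt1 : St.1.length = nd := ih2
      have hmid : (St.1 ++ List.replicate (pnew - (nd + 1)) 1).length = pnew - 1 := by
        simp only [List.length_append, List.length_replicate]
        omega
      have h1j : 1 ≤ 2 ^ j := Nat.one_le_two_pow
      have hresA : 2 ^ j ≤ nd → res2[2 ^ j - 1]? = St.1[2 ^ j - 1]? := by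
        intro hle
        rw [hres2, List.getElem?_append_left (by rw [hmid]; omega),
          List.getElem?_append_left (by rw [hSt1]; omega)]
      have hresB : nd < 2 ^ j → res2[2 ^ j - 1]? = some 1 := by
        intro hgt
        rw [hres2, List.getElem?_append_left (by rw [hmid]; omega),
          List.getElem?_append_right (by rw [hSt1]; omega),
          List.getElem?_replicate, if_pos (by rw [hSt1]; omega)]
      have hold : nd < 2 ^ j → pvPar (Pd.zip done) j = 1 := by
        intro hgt
        apply pvPar_one
        intro x hx
        have hx1 : x.1 ∈ Pd := (List.of_mem_zip (by simpa using hx)).1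
        exact pvAndSmall _ _ (by have := (ps3 x.1 hx1).2.2; omega)
      by_cases hb : pnew &&& 2 ^ j ≠ 0
      · rw [pvXorMasks_get_hit res2 0 pnew v j (Nat.zero_le _) hjlt hb (by rw [hlen2]; omega),
          if_pos hb]
        by_cases hle : 2 ^ j ≤ nd
        · rw [hresA hle, ih3 j hle]
          rfl
        · rw [hresB (by omega), hold (by omega)]
          rfl
      · rw [pvXorMasks_get_untouched _ _ _ _ _
          (fun jj _ hjj2 hjj3 he => hb (by rwa [pvPowInj j jj (by omega)] )), if_neg hb]
        by_cases hle : 2 ^ j ≤ nd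
        · rw [hresA hle, ih3 j hle]
        · rw [hresB (by omega), hold (by omega)]
    · intro k hk
      rw [hposapp] at hk ⊢
      simp only [List.length_append, List.length_cons, List.length_nil] at hk
      rw [hstep]
      show (pvXorMasks res2 0 pnew v)[(Pd ++ [pnew]).getD k 0 - 1]? = some ((done ++ [v]).getD k 0)
      by_cases hklt : k < Pd.length
      · have hmem : Pd.getD k 0 ∈ Pd := by
          rw [List.getD_eq_getElem _ _ hklt]
          exact List.getElem_mem hklt
        obtain ⟨hq1, hq2, hq3⟩ := ps3 _ hmem
        rw [List.getD_append _ _ _ _ hklt, List.getD_append _ _ _ _ (by omega)]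
        rw [pvXorMasks_get_untouched _ _ _ _ _
          (fun jj _ _ _ he => hq1 ⟨jj, by have := Nat.one_le_two_pow (n := jj); omega⟩)]
        have hSt1 : St.1.length = nd := ih2
        have hmid : (St.1 ++ List.replicate (pnew - (nd + 1)) 1).length = pnew - 1 := by
          simp only [List.length_append, List.length_replicate]
          omega
        have hres : res2[Pd.getD k 0 - 1]? = St.1[Pd.getD k 0 - 1]? := by
          rw [hres2, List.getElem?_append_left (by rw [hmid]; omega),
            List.getElem?_append_left (by rw [hSt1]; omega)]
        rw [hres]
        exact ih4 k hklt
      · have hkeq : k = Pd.length := by omega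
        have hgd1 : (Pd ++ [pnew]).getD k 0 = pnew := by
          rw [List.getD_eq_getElem?_getD, hkeq, List.getElem?_concat_length]
          rfl
        have hgd2 : (done ++ [v]).getD k 0 = v := by
          rw [List.getD_eq_getElem?_getD, hkeq, ps1, List.getElem?_concat_length]
          rfl
        rw [hgd1, hgd2]
        rw [pvXorMasks_get_untouched _ _ _ _ _
          (fun jj _ _ _ he => np2 ⟨jj, by have := Nat.one_le_two_pow (n := jj); omega⟩)]
        have hSt1 : St.1.length = nd := ih2
        have hplen : (St.1 ++ List.replicate (pnew - (nd + 1)) 1).length = pnew - 1 := by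
          simp only [List.length_append, List.length_replicate]
          omega
        rw [hres2, show pnew - 1 = (St.1 ++ List.replicate (pnew - (nd + 1)) 1).length from hplen.symm,
          List.getElem?_concat_length]

theorem pvCore (vals : List Int) (hnil : vals ≠ []) :
    (vals.foldl pvAStepV ([], 1)).1 =
      pvParLoop
        (((pvPositions vals 0).zip vals).foldl
          (fun res qv => PySem.List.pySetD res ((qv.1 - 1 : Nat) : Int) qv.2)
          (List.replicate (PySem.List.pyGetD (pvPositions vals 0) (-1) 0) (0 : Int)))
        ((pvPositions vals 0).zip vals) 0
        (PySem.List.pyGetD (pvPositions vals 0) (-1) 0) := by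
  obtain ⟨ps1, ps2, ps3, ps4, ps5⟩ := pvPositions_spec vals 0
  set P := pvPositions vals 0 with hP
  have hPne : P ≠ [] := by
    intro h0
    apply hnil
    rw [← List.length_eq_zero_iff, ← ps1, h0]
    rfl
  set n := P.getLastD 0 with hn
  have hpy : PySem.List.pyGetD P (-1) 0 = n := by
    rw [PySem.List.pyGetD_neg_one P 0 hPne]
    exact pvGetLast_getLastD P hPne 0
  obtain ⟨ih1, ih2, ih3, ih4⟩ := pvA_char vals
  rw [← hP] at ih1 ih2 ih3 ih4
  rw [← hn] at ih1 ih2 ih3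
  obtain ⟨hn1, hn2, hn3⟩ := ps3 n (pvGetLastD_mem _ _ hPne)
  rw [hpy]
  have hplacedlen :
      ((P.zip vals).foldl
        (fun res qv => PySem.List.pySetD res ((qv.1 - 1 : Nat) : Int) qv.2)
        (List.replicate n (0 : Int))).length = n := by
    rw [pvPlaced_length, List.length_replicate]
  have hblen :
      (pvParLoop
        ((P.zip vals).foldl
          (fun res qv => PySem.List.pySetD res ((qv.1 - 1 : Nat) : Int) qv.2)
          (List.replicate n (0 : Int)))
        (P.zip vals) 0 n).length = n := by
    rw [pvParLoop_length, hplacedlen]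
  apply List.ext_getElem?
  intro t
  by_cases htn : t < n
  · by_cases hpow : ∃ jj, t + 1 = 2 ^ jj
    · obtain ⟨jj, hjj⟩ := hpow
      have h1 : 1 ≤ 2 ^ jj := Nat.one_le_two_pow
      have ht : t = 2 ^ jj - 1 := by omega
      have hjn : 2 ^ jj < n := by
        rcases Nat.eq_or_lt_of_le (show 2 ^ jj ≤ n by omega) with he | hlt
        · exact absurd ⟨jj, he.symm⟩ hn1
        · exact hlt
      rw [ht, ih3 jj (by omega), pvParLoop_get_pow _ _ _ _ jj (Nat.zero_le _) hjn hplacedlen.ge]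
    · have hmem : t + 1 ∈ P := by
        rcases ps4 (t + 1) (by omega) (by omega) with hp | hm
        · exact absurd hp hpow
        · exact hm
      obtain ⟨k, hk, hkeq⟩ := List.mem_iff_getElem.mp hmem
      have hkv : k < vals.length := by rw [← ps1]; exact hk
      have hzlen : (P.zip vals).length = vals.length := by
        rw [List.length_zip, ps1, Nat.min_self]
      -- A side
      have hA : (vals.foldl pvAStepV ([], 1)).1[t]? = some vals[k] := by
        have := ih4 k hk
        rw [List.getD_eq_getElem _ _ hk, hkeq] at this
        simp only [Nat.add_sub_cancel] at this
        rw [this, List.getD_eq_getElem _ _ hkv]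
      rw [hA]
      -- B side
      rw [pvParLoop_get_untouched _ _ _ _ _
        (fun jj _ _ he => hpow ⟨jj, by have : 1 ≤ 2 ^ jj := Nat.one_le_two_pow; omega⟩)]
      rw [pvPlaced_get_hit (P.zip vals) t _ (pvPairwise_zip P vals ps2)
        (fun x hx => (ps3 x.1 (List.of_mem_zip (by simpa using hx)).1).2.1)
        (by rw [List.length_replicate]; exact htn)
        k (by omega) (by rw [List.getElem_zip]; exact hkeq)]
      rw [List.getElem_zip]
  · rw [List.getElem?_eq_none (by omega), List.getElem?_eq_none (by rw [hblen]; omega)]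

-- ===== VERDICT (by name: the statement is the Claim_ definition above) =====
theorem block_ham_spec : Claim_equal_block_ham := by
  intro block _
  show block_ham block = block_ham_alt block
  unfold block_ham block_ham_alt
  show (List.foldl (fun st bit => pvAStepV st (if bit = '1' then 1 else 0)) ([], 1) block.toList).1
      = if block.toList.map (fun c => if c = '1' then (1 : Int) else 0) = [] then []
        else
          pvParLoop
            (((pvPositions (block.toList.map (fun c => if c = '1' then (1 : Int) else 0)) 0).zip
                (block.toList.map (fun c => if c = '1' then (1 : Int) else 0))).foldl
              (fun res qv => PySem.List.pySetD res ((qv.1 - 1 : Nat) : Int) qv.2)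
              (List.replicate
                (PySem.List.pyGetD
                  (pvPositions (block.toList.map (fun c => if c = '1' then (1 : Int) else 0)) 0)
                  (-1) 0)
                (0 : Int)))
            ((pvPositions (block.toList.map (fun c => if c = '1' then (1 : Int) else 0)) 0).zip
              (block.toList.map (fun c => if c = '1' then (1 : Int) else 0)))
            0
            (PySem.List.pyGetD
              (pvPositions (block.toList.map (fun c => if c = '1' then (1 : Int) else 0)) 0)
              (-1) 0)
  have hfm := List.foldl_map (f := fun c : Char => if c = '1' then (1 : Int) else 0)
    (g := pvAStepV) (l := block.toList) (init := (([] : List Int), (1 : Nat)))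
  rw [← hfm]
  by_cases hnil : block.toList.map (fun c => if c = '1' then (1 : Int) else 0) = []
  · rw [if_pos hnil, hnil]
    rfl
  · rw [if_neg hnil]
    exact pvCore _ hnil
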